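-- pv_equiv track=rewrite | github.com/Chaeun26/leet_code | 0550-shortest-path-to-get-food/0550-shortest-path-to-get-food.py | getFood
-- ===== SOURCE A (Python) =====
-- from typing import List
--
-- from collections import deque
--
-- def getFood(grid: List[List[str]]) -> int:
--     m,n=len(grid),len(grid[0])
--
--     q=deque()
--     visited=set()
--
--     for r in range(m):
--         for c in range(n):
--             if grid[r][c]=="*":
--                 q.append((r,c,0))
--                 visited.add((r,c))
--                 break
--
--     directions=[(0,1),(1,0),(-1,0),(0,-1)]
--
--     while q:
--         x,y,count= q.popleft()
--
--         for dx,dy in directions: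
--             nx,ny=x+dx,y+dy
--             if 0<=nx<m and 0<=ny<n and (nx,ny) not in visited:
--                 if grid[nx][ny]=="O":
--                     visited.add((nx,ny))
--                     q.append((nx,ny,count+1))
--                 elif grid[nx][ny]=="#":
--                     return count+1
--
--     return -1
-- ===== SOURCE B (Python) =====
-- from typing import List
--
--
-- def neighbors(x, y):
--     return ((x, y + 1), (x + 1, y), (x - 1, y), (x, y - 1))
--
--
-- def getFood(grid: List[List[str]]) -> int:
--     m, n = len(grid), len(grid[0])
--     cur = set()
--     for r in range(m):
--         head = grid[r][:n]
--         if "*" in head: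
--             cur.add((r, head.index("*")))
--     dist = 0
--     while True:
--         if any(0 <= nx < m and 0 <= ny < n and grid[nx][ny] == "#"
--                for (x, y) in cur for (nx, ny) in neighbors(x, y)):
--             return dist + 1
--         grown = [(r, c) for r in range(m) for c in range(n)
--                  if grid[r][c] == "O" and (r, c) not in cur
--                  and any(q in cur for q in neighbors(r, c))]
--         if not grown:
--             return -1
--         cur.update(grown)
--         dist += 1
-- ===== Notes on version B (the rewrite author's own statement) =====
-- stated objective: alternative
-- what changed: Replaces A's BFS queue of (row, col, count) triples with a queue-free region-dilation fixed point: keep the entire reached region as one set and repeatedly sweep the whole grid, adding every open cell adjacent to the region, counting sweeps until the region touches a '#' cell; seeding uses slice-membership plus list.index per row instead of A's scan-with-break.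
-- outside the precondition, e.g. on getFood([['*', '#'], ['*']]): A returns 1, B raises IndexError
import Mathlib
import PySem

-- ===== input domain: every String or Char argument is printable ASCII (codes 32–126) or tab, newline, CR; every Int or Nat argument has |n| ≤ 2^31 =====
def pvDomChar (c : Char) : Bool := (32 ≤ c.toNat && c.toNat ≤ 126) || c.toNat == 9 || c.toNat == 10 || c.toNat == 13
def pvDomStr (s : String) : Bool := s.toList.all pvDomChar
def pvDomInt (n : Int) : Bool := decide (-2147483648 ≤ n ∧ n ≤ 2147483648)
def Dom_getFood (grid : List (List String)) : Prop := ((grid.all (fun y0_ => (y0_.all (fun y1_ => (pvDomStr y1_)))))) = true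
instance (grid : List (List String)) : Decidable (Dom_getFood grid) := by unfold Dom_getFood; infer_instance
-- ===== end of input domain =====

-- B replaces A's BFS queue entirely: it keeps the whole reached region as one set and
-- repeatedly sweeps the full grid, adding every open cell adjacent to the region
-- (morphological dilation to a fixed point), counting sweeps until the region touches
-- food; same return value, objective: alternative algorithm/data structure.

-- ===== PORT A =====

-- grid[i][j]; exact whenever 0 ≤ i < len(grid) and 0 ≤ j < len(grid[i]),
-- which every use below guarantees via its bounds guard (and Pre_).
def gridAt (grid : List (List String)) (i j : Int) : String :=
  PySem.List.pyGetD (PySem.List.pyGetD grid i []) j ""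

-- all in-range coordinates, row-major (shared by both ports' termination measure)
def cells (m n : Int) : List (Int × Int) :=
  (PySem.List.pyRange 0 m 1).flatMap
    (fun r => (PySem.List.pyRange 0 n 1).map (fun c => (r, c)))

-- number of in-range cells not yet visited; only used as a termination measure
def unvis (m n : Int) (vis : PySem.Set (Int × Int)) : Nat :=
  ((cells m n).filter (fun p => !(PySem.Set.contains vis p))).length

lemma contains_eq_true_iff (s : PySem.Set (Int × Int)) (q : Int × Int) :
    PySem.Set.contains s q = true ↔ q ∈ s := by
  rw [PySem.Set.contains]; exact List.contains_iff_mem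

lemma contains_add_iff (s : PySem.Set (Int × Int)) (p q : Int × Int) :
    PySem.Set.contains (PySem.Set.add s p) q = true ↔
      PySem.Set.contains s q = true ∨ q = p := by
  rw [contains_eq_true_iff, contains_eq_true_iff, PySem.Set.mem_add]

lemma filter_length_lt {α : Type} (p q : α → Bool) (x : α)
    (hp : p x = true) (hq : q x = false)
    (himp : ∀ a, q a = true → p a = true) :
    ∀ (l : List α), x ∈ l → (l.filter q).length < (l.filter p).length := by
  intro l
  induction l with
  | nil => intro hx; cases hx
  | cons a t ih =>
    intro hx
    have hle : (t.filter q).length ≤ (t.filter p).length := by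
      rw [← List.countP_eq_length_filter, ← List.countP_eq_length_filter]
      exact List.countP_mono_left (fun a _ h => himp a h)
    rw [List.filter_cons, List.filter_cons]
    by_cases hax : a = x
    · subst hax
      rw [hp, hq]
      simp only [Bool.false_eq_true, if_true, if_false, List.length_cons]
      omega
    · have hxt : x ∈ t := by
        rcases List.mem_cons.1 hx with h | h
        · exact absurd h.symm hax
        · exact h
      have := ih hxt
      by_cases hqa : q a = true
      · rw [hqa, himp a hqa]; simp only [if_true, List.length_cons]; omega
      · rw [Bool.not_eq_true] at hqa
        rw [hqa]
        by_cases hpa : p a = true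
        · rw [hpa]; simp only [Bool.false_eq_true, if_true, if_false, List.length_cons]; omega
        · rw [Bool.not_eq_true] at hpa
          rw [hpa]; simp only [Bool.false_eq_true, if_false]; omega

lemma unvis_add_lt (m n : Int) (vis : PySem.Set (Int × Int)) (x y : Int)
    (h1 : 0 ≤ x) (h2 : x < m) (h3 : 0 ≤ y) (h4 : y < n)
    (h5 : PySem.Set.contains vis (x, y) = false) :
    unvis m n (PySem.Set.add vis (x, y)) < unvis m n vis := by
  unfold unvis
  apply filter_length_lt
  · rw [Bool.not_eq_true', h5]
  · rw [Bool.not_eq_false']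
    exact (contains_add_iff vis (x, y) (x, y)).2 (Or.inr rfl)
  · intro a ha
    rw [Bool.not_eq_true'] at ha ⊢
    rw [← Bool.not_eq_true] at ha ⊢
    intro hc
    exact ha ((contains_add_iff vis (x, y) a).2 (Or.inl hc))
  · simp only [cells, List.mem_flatMap, List.mem_map]
    exact ⟨x, by rw [PySem.List.mem_pyRange_one]; omega,
           y, by rw [PySem.List.mem_pyRange_one]; omega, rfl⟩

-- measure of a loop state, for termination only
def measA (m n : Int) (s : (List (Int × Int × Int) × PySem.Set (Int × Int)) ⊕ Int) : Nat :=
  match s with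
  | .inl (q, vis) => 5 * unvis m n vis + q.length
  | .inr _ => 0

lemma foldl_mono {σ α : Type} (f : σ → α → σ) (μ : σ → Nat)
    (hf : ∀ s a, μ (f s a) ≤ μ s) :
    ∀ (l : List α) (s : σ), μ (l.foldl f s) ≤ μ s := by
  intro l
  induction l with
  | nil => intro s; exact Nat.le_refl _
  | cons a t ih =>
    intro s
    exact Nat.le_trans (ih (f s a)) (hf s a)

-- inner 'for c in range(n): if grid[r][c]=="*": … break' — first matching column
def firstStarA (grid : List (List String)) (r : Int) : List Int → Option Int
  | [] => none
  | c :: cs => if gridAt grid r c == "*" then some c else firstStarA grid r cs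

-- the seeding double loop of A
def seedA (grid : List (List String)) (m n : Int) :
    List (Int × Int × Int) × PySem.Set (Int × Int) :=
  (PySem.List.pyRange 0 m 1).foldl
    (fun qv r =>
      match firstStarA grid r (PySem.List.pyRange 0 n 1) with
      | some c => (qv.1 ++ [(r, c, (0 : Int))], PySem.Set.add qv.2 (r, c))
      | none => qv)
    ([], PySem.Set.empty)

-- one direction (dx,dy) of A's inner for-loop; .inr k = the early 'return k'
def dirStepA (grid : List (List String)) (m n x y count : Int)
    (s : (List (Int × Int × Int) × PySem.Set (Int × Int)) ⊕ Int) (d : Int × Int) :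
    (List (Int × Int × Int) × PySem.Set (Int × Int)) ⊕ Int :=
  match s with
  | .inr k => .inr k
  | .inl (q, vis) =>
    let nx := x + d.1
    let ny := y + d.2
    if 0 ≤ nx ∧ nx < m ∧ 0 ≤ ny ∧ ny < n ∧ PySem.Set.contains vis (nx, ny) = false then
      if gridAt grid nx ny == "O" then
        .inl (q ++ [(nx, ny, count + 1)], PySem.Set.add vis (nx, ny))
      else if gridAt grid nx ny == "#" then .inr (count + 1)
      else .inl (q, vis)
    else .inl (q, vis)

lemma dirStepA_mono (grid : List (List String)) (m n x y count : Int)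
    (s : (List (Int × Int × Int) × PySem.Set (Int × Int)) ⊕ Int) (d : Int × Int) :
    measA m n (dirStepA grid m n x y count s d) ≤ measA m n s := by
  match s with
  | .inr k => exact Nat.le_refl _
  | .inl (q, vis) =>
    rw [dirStepA]
    split_ifs with hg hO hH
    · obtain ⟨g1, g2, g3, g4, g5⟩ := hg
      have := unvis_add_lt m n vis (x + d.1) (y + d.2) g1 g2 g3 g4 g5
      simp only [measA, List.length_append, List.length_cons, List.length_nil]
      omega
    · exact Nat.zero_le _
    · exact Nat.le_refl _
    · exact Nat.le_refl _

lemma foldA_bound (grid : List (List String)) (m n x y count : Int) :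
    ∀ (ds : List (Int × Int)) (q : List (Int × Int × Int)) (vis : PySem.Set (Int × Int))
      (q' : List (Int × Int × Int)) (vis' : PySem.Set (Int × Int)),
      ds.foldl (dirStepA grid m n x y count) (.inl (q, vis)) = .inl (q', vis') →
      5 * unvis m n vis' + q'.length ≤ 5 * unvis m n vis + q.length := by
  intro ds q vis q' vis' h
  have := foldl_mono (dirStepA grid m n x y count) (measA m n)
    (dirStepA_mono grid m n x y count) ds (.inl (q, vis))
  rw [h] at this
  exact this

-- A's while loop
def bfsA (grid : List (List String)) (m n : Int)
    (q : List (Int × Int × Int)) (vis : PySem.Set (Int × Int)) : Int :=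
  match q with
  | [] => -1
  | (x, y, count) :: rest =>
    match h : ([((0 : Int), (1 : Int)), (1, 0), (-1, 0), (0, -1)]).foldl
        (dirStepA grid m n x y count) (.inl (rest, vis)) with
    | .inr k => k
    | .inl (q', vis') => bfsA grid m n q' vis'
termination_by 5 * unvis m n vis + q.length
decreasing_by
  have hb := foldA_bound grid m n x y count _ rest vis q' vis' h
  simp only [List.length_cons]
  omega

def getFood (grid : List (List String)) : Int :=
  let m : Int := grid.length
  let n : Int := (grid.headD []).length
  let qv := seedA grid m n
  bfsA grid m n qv.1 qv.2

-- ===== PORT B =====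

-- the four neighbours of (x, y), as in Source B's neighbors()
def nbrs (p : Int × Int) : List (Int × Int) :=
  [(p.1, p.2 + 1), (p.1 + 1, p.2), (p.1 - 1, p.2), (p.1, p.2 - 1)]

-- B's seeding loop: per row take the first n entries, membership test, then .index
def seedC (grid : List (List String)) (m n : Int) : PySem.Set (Int × Int) :=
  (PySem.List.pyRange 0 m 1).foldl
    (fun cur r =>
      let head := PySem.List.slice (PySem.List.pyGetD grid r []) none (some n)
      if head.contains "*" then
        -- head.index("*"): the guard makes index? a some, so getD 0 is exact
        PySem.Set.add cur (r, (((PySem.List.index? head "*").getD 0 : Nat) : Int))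
      else cur)
    PySem.Set.empty

-- is q an in-range '#' cell?
def hashB (grid : List (List String)) (m n : Int) (q : Int × Int) : Bool :=
  decide (0 ≤ q.1 ∧ q.1 < m ∧ 0 ≤ q.2 ∧ q.2 < n) && (gridAt grid q.1 q.2 == "#")

-- Source B's list comprehension: open cells outside the region but adjacent to it
def growns (grid : List (List String)) (m n : Int) (cur : PySem.Set (Int × Int)) :
    List (Int × Int) :=
  (cells m n).filter
    (fun p => (gridAt grid p.1 p.2 == "O") && !(PySem.Set.contains cur p)
      && (nbrs p).any (fun q => PySem.Set.contains cur q))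

lemma contains_foldl_add (S : PySem.Set (Int × Int)) (L : List (Int × Int)) (q : Int × Int) :
    PySem.Set.contains (L.foldl PySem.Set.add S) q = true ↔
      PySem.Set.contains S q = true ∨ q ∈ L := by
  induction L generalizing S with
  | nil => simp
  | cons a t ih =>
    rw [List.foldl_cons, ih, contains_add_iff, List.mem_cons]
    tauto

-- growing the region by a fresh in-range cell shrinks the termination measure
lemma unvis_update_lt (m n : Int) (cur : PySem.Set (Int × Int)) (L : List (Int × Int))
    (g : Int × Int) (hgL : g ∈ L) (h1 : 0 ≤ g.1) (h2 : g.1 < m) (h3 : 0 ≤ g.2)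
    (h4 : g.2 < n) (hnc : PySem.Set.contains cur g = false) :
    unvis m n (L.foldl PySem.Set.add cur) < unvis m n cur := by
  unfold unvis
  apply filter_length_lt _ _ g
  · rw [Bool.not_eq_true', hnc]
  · rw [Bool.not_eq_false']
    exact (contains_foldl_add cur L g).2 (Or.inr hgL)
  · intro a ha
    rw [Bool.not_eq_true'] at ha ⊢
    rw [← Bool.not_eq_true] at ha ⊢
    intro hc
    exact ha ((contains_foldl_add cur L a).2 (Or.inl hc))
  · simp only [cells, List.mem_flatMap, List.mem_map]
    exact ⟨g.1, by rw [PySem.List.mem_pyRange_one]; omega,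
           g.2, by rw [PySem.List.mem_pyRange_one]; omega, rfl⟩

-- Source B's while loop: dilate the region one step per iteration
def sweep (grid : List (List String)) (m n : Int)
    (cur : PySem.Set (Int × Int)) (dist : Int) : Int :=
  if cur.any (fun p => (nbrs p).any (hashB grid m n)) then dist + 1
  else if hne : growns grid m n cur = [] then -1
  else sweep grid m n ((growns grid m n cur).foldl PySem.Set.add cur) (dist + 1)
termination_by unvis m n cur
decreasing_by
  obtain ⟨g, hgmem⟩ := List.exists_mem_of_ne_nil _ hne
  have hf := List.mem_filter.1 hgmem
  have hpred := hf.2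
  simp only [Bool.and_eq_true, Bool.not_eq_true'] at hpred
  have hrange : 0 ≤ g.1 ∧ g.1 < m ∧ 0 ≤ g.2 ∧ g.2 < n := by
    simp only [cells, List.mem_flatMap, List.mem_map] at hf
    obtain ⟨⟨r, hr, c, hc, hgc⟩, -⟩ := hf
    rw [PySem.List.mem_pyRange_one] at hr hc
    subst hgc
    exact ⟨hr.1, hr.2, hc.1, hc.2⟩
  exact unvis_update_lt m n cur (growns grid m n cur) g hgmem hrange.1 hrange.2.1
    hrange.2.2.1 hrange.2.2.2 hpred.1.2

def getFood_alt (grid : List (List String)) : Int :=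
  let m : Int := grid.length
  let n : Int := (grid.headD []).length
  sweep grid m n (seedC grid m n) 0

-- ===== PRECONDITION & SPEC =====

-- Pre_ excludes the empty grid (A raises IndexError on len(grid[0])) and grids with a row
-- shorter than the first row, on which A's row scans usually raise IndexError (a few such
-- grids still return, when every short row carries an early '*').
def Pre_getFood (grid : List (List String)) : Prop :=
  grid ≠ [] ∧ ∀ row ∈ grid, (grid.headD []).length ≤ row.length
instance (grid : List (List String)) : Decidable (Pre_getFood grid) := by
  unfold Pre_getFood; infer_instance

def pvWitness_getFood : List (List String) :=
  [["*", "O", "X"], ["O", "X", "#"]]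

def Spec_getFood (grid : List (List String)) (out : Int) : Prop := out = getFood_alt grid
instance (grid : List (List String)) (out : Int) : Decidable (Spec_getFood grid out) := by
  unfold Spec_getFood; infer_instance

-- ===== CLAIM (what is proved, stated in full; the proofs are below) =====
def Claim_equal_getFood : Prop :=
  ∀ (grid : List (List String)), Dom_getFood grid → Pre_getFood grid →
    Spec_getFood grid (getFood grid)

-- ===== LEMMAS AND PROOFS =====

-- ---- proof-only helper: A's BFS restated layer by layer (list frontiers) ----

def measB (m n : Int) (s : (List (Int × Int) × PySem.Set (Int × Int)) ⊕ Int) : Nat :=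
  match s with
  | .inl (nxt, vis) => 5 * unvis m n vis + nxt.length
  | .inr _ => 0

-- seeding restated with both the frontier list and the visited set
def seedB (grid : List (List String)) (m n : Int) :
    List (Int × Int) × PySem.Set (Int × Int) :=
  (PySem.List.pyRange 0 m 1).foldl
    (fun fv r =>
      let head := PySem.List.slice (PySem.List.pyGetD grid r []) none (some n)
      if head.contains "*" then
        let c : Int := ((PySem.List.index? head "*").getD 0 : Nat)
        (fv.1 ++ [(r, c)], PySem.Set.add fv.2 (r, c))
      else fv)
    ([], PySem.Set.empty)

-- one neighbour (nx,ny); .inr k = the early 'return k'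
def dirStepB (grid : List (List String)) (m n dist : Int)
    (s : (List (Int × Int) × PySem.Set (Int × Int)) ⊕ Int) (pq : Int × Int) :
    (List (Int × Int) × PySem.Set (Int × Int)) ⊕ Int :=
  match s with
  | .inr k => .inr k
  | .inl (nxt, vis) =>
    if 0 ≤ pq.1 ∧ pq.1 < m ∧ 0 ≤ pq.2 ∧ pq.2 < n ∧
        PySem.Set.contains vis (pq.1, pq.2) = false then
      let cell := gridAt grid pq.1 pq.2
      if cell == "#" then .inr (dist + 1)
      else if cell == "O" then .inl (nxt ++ [(pq.1, pq.2)], PySem.Set.add vis (pq.1, pq.2))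
      else .inl (nxt, vis)
    else .inl (nxt, vis)

-- one frontier node (x,y) of the layer loop
def nodeStepB (grid : List (List String)) (m n dist : Int)
    (s : (List (Int × Int) × PySem.Set (Int × Int)) ⊕ Int) (p : Int × Int) :
    (List (Int × Int) × PySem.Set (Int × Int)) ⊕ Int :=
  match s with
  | .inr k => .inr k
  | .inl st =>
    ([(p.1, p.2 + 1), (p.1 + 1, p.2), (p.1 - 1, p.2), (p.1, p.2 - 1)]).foldl
      (dirStepB grid m n dist) (.inl st)

lemma dirStepB_mono (grid : List (List String)) (m n dist : Int)
    (s : (List (Int × Int) × PySem.Set (Int × Int)) ⊕ Int) (pq : Int × Int) :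
    measB m n (dirStepB grid m n dist s pq) ≤ measB m n s := by
  match s with
  | .inr k => exact Nat.le_refl _
  | .inl (nxt, vis) =>
    simp only [dirStepB]
    split_ifs with hg hH hO
    · exact Nat.zero_le _
    · obtain ⟨g1, g2, g3, g4, g5⟩ := hg
      have := unvis_add_lt m n vis pq.1 pq.2 g1 g2 g3 g4 g5
      simp only [measB, List.length_append, List.length_cons, List.length_nil]
      omega
    · exact Nat.le_refl _
    · exact Nat.le_refl _

lemma nodeStepB_mono (grid : List (List String)) (m n dist : Int)
    (s : (List (Int × Int) × PySem.Set (Int × Int)) ⊕ Int) (p : Int × Int) :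
    measB m n (nodeStepB grid m n dist s p) ≤ measB m n s := by
  match s with
  | .inr k => exact Nat.le_refl _
  | .inl st =>
    exact foldl_mono (dirStepB grid m n dist) (measB m n)
      (dirStepB_mono grid m n dist) _ (.inl st)

lemma foldB_bound (grid : List (List String)) (m n dist : Int) :
    ∀ (ps : List (Int × Int)) (nxt : List (Int × Int)) (vis : PySem.Set (Int × Int))
      (nxt' : List (Int × Int)) (vis' : PySem.Set (Int × Int)),
      ps.foldl (nodeStepB grid m n dist) (.inl (nxt, vis)) = .inl (nxt', vis') →
      5 * unvis m n vis' + nxt'.length ≤ 5 * unvis m n vis + nxt.length := by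
  intro ps nxt vis nxt' vis' h
  have := foldl_mono (nodeStepB grid m n dist) (measB m n)
    (nodeStepB_mono grid m n dist) ps (.inl (nxt, vis))
  rw [h] at this
  exact this

-- the layered restatement of A's while loop, one whole layer per step
def bfsB (grid : List (List String)) (m n : Int)
    (frontier : List (Int × Int)) (dist : Int) (vis : PySem.Set (Int × Int)) : Int :=
  match frontier with
  | [] => -1
  | _ :: _ =>
    match h : frontier.foldl (nodeStepB grid m n dist) (.inl ([], vis)) with
    | .inr k => k
    | .inl (nxt, vis') => bfsB grid m n nxt (dist + 1) vis'
termination_by 5 * unvis m n vis + frontier.length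
decreasing_by
  have hb := foldB_bound grid m n dist _ [] vis nxt vis' h
  simp only [List.length_nil, List.length_cons] at *
  omega

lemma foldA_inr (grid : List (List String)) (m n x y count : Int) (k : Int) :
    ∀ (ds : List (Int × Int)),
      ds.foldl (dirStepA grid m n x y count) (.inr k) = .inr k := by
  intro ds
  induction ds with
  | nil => rfl
  | cons d t ih => exact ih

-- (r, c) ↦ (r, c, dist): the A-queue entry for a frontier node of layer dist
def fan (dist : Int) (p : Int × Int) : Int × Int × Int := (p.1, p.2, dist)

-- embeds a layered loop state into the corresponding A loop state (t = untouched layer tail)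
def mapSt (t : List (Int × Int × Int)) (dist : Int) :
    ((List (Int × Int) × PySem.Set (Int × Int)) ⊕ Int) →
      ((List (Int × Int × Int) × PySem.Set (Int × Int)) ⊕ Int)
  | .inr k => .inr k
  | .inl (nxt, vis) => .inl (t ++ nxt.map (fan (dist + 1)), vis)

lemma foldBdir_inr (grid : List (List String)) (m n dist : Int) (k : Int) :
    ∀ (ps : List (Int × Int)),
      ps.foldl (dirStepB grid m n dist) (.inr k) = .inr k := by
  intro ps
  induction ps with
  | nil => rfl
  | cons p t ih => exact ih

lemma foldNodeB_inr (grid : List (List String)) (m n dist : Int) (k : Int) :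
    ∀ (ps : List (Int × Int)),
      ps.foldl (nodeStepB grid m n dist) (.inr k) = .inr k := by
  intro ps
  induction ps with
  | nil => rfl
  | cons p t ih => exact ih

lemma dirstep_corr (grid : List (List String)) (m n x y dist : Int)
    (t : List (Int × Int × Int)) (nxt : List (Int × Int)) (vis : PySem.Set (Int × Int))
    (d : Int × Int) :
    dirStepA grid m n x y dist (.inl (t ++ nxt.map (fan (dist + 1)), vis)) d
      = mapSt t dist (dirStepB grid m n dist (.inl (nxt, vis)) (x + d.1, y + d.2)) := by
  simp only [dirStepA, dirStepB]
  by_cases hg : 0 ≤ x + d.1 ∧ x + d.1 < m ∧ 0 ≤ y + d.2 ∧ y + d.2 < n ∧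
      PySem.Set.contains vis (x + d.1, y + d.2) = false
  · rw [if_pos hg, if_pos hg]
    by_cases hH : gridAt grid (x + d.1) (y + d.2) = "#"
    · have hO : (gridAt grid (x + d.1) (y + d.2) == "O") = false := by
        rw [hH]; decide
      rw [hO, if_neg (by simp), hH]
      rw [if_pos (by decide), if_pos (by decide)]
      rfl
    · by_cases hO : gridAt grid (x + d.1) (y + d.2) = "O"
      · rw [hO]
        rw [if_pos (by decide), if_neg (by decide), if_pos (by decide)]
        simp only [mapSt, fan, List.map_append, List.map_cons, List.map_nil,
          List.append_assoc]
      · rw [if_neg (by simp [hO]), if_neg (by simp [hH]), if_neg (by simp [hH]),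
          if_neg (by simp [hO])]
        rfl
  · rw [if_neg hg, if_neg hg]
    rfl

lemma foldcorr (grid : List (List String)) (m n x y dist : Int)
    (t : List (Int × Int × Int)) :
    ∀ (ds : List (Int × Int)) (nxt : List (Int × Int)) (vis : PySem.Set (Int × Int)),
      ds.foldl (dirStepA grid m n x y dist) (.inl (t ++ nxt.map (fan (dist + 1)), vis))
        = mapSt t dist ((ds.map (fun d => (x + d.1, y + d.2))).foldl
            (dirStepB grid m n dist) (.inl (nxt, vis))) := by
  intro ds
  induction ds with
  | nil => intro nxt vis; rfl
  | cons d ds ih =>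
    intro nxt vis
    rw [List.foldl_cons, List.map_cons, List.foldl_cons, dirstep_corr]
    cases hB : dirStepB grid m n dist (.inl (nxt, vis)) (x + d.1, y + d.2) with
    | inr k =>
      rw [mapSt, foldA_inr, foldBdir_inr]
      rfl
    | inl st =>
      obtain ⟨nxt2, vis2⟩ := st
      rw [mapSt]
      exact ih nxt2 vis2

lemma dirs_map (x y : Int) :
    ([((0 : Int), (1 : Int)), (1, 0), (-1, 0), (0, -1)]).map
        (fun d => (x + d.1, y + d.2))
      = [(x, y + 1), (x + 1, y), (x - 1, y), (x, y - 1)] := by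
  norm_num
  omega

lemma foldBdir_bound (grid : List (List String)) (m n dist : Int)
    (ds : List (Int × Int)) (nxt : List (Int × Int)) (vis : PySem.Set (Int × Int))
    (nxt' : List (Int × Int)) (vis' : PySem.Set (Int × Int))
    (h : ds.foldl (dirStepB grid m n dist) (.inl (nxt, vis)) = .inl (nxt', vis')) :
    5 * unvis m n vis' + nxt'.length ≤ 5 * unvis m n vis + nxt.length := by
  have := foldl_mono (dirStepB grid m n dist) (measB m n)
    (dirStepB_mono grid m n dist) ds (.inl (nxt, vis))
  rw [h] at this
  exact this

lemma mid (grid : List (List String)) (m n : Int) :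
    ∀ (μ : Nat) (t nxt : List (Int × Int)) (vis : PySem.Set (Int × Int)) (dist : Int),
      5 * unvis m n vis + t.length + nxt.length ≤ μ →
      bfsA grid m n (t.map (fan dist) ++ nxt.map (fan (dist + 1))) vis
        = (match t.foldl (nodeStepB grid m n dist) (.inl (nxt, vis)) with
           | .inr k => k
           | .inl (nxt', vis') => bfsB grid m n nxt' (dist + 1) vis') := by
  intro μ
  induction μ with
  | zero =>
    intro t nxt vis dist hμ
    have ht : t = [] := List.eq_nil_of_length_eq_zero (by omega)
    have hn : nxt = [] := List.eq_nil_of_length_eq_zero (by omega)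
    subst ht; subst hn
    simp [bfsA, bfsB]
  | succ μ ih =>
    intro t nxt vis dist hμ
    cases t with
    | nil =>
      simp only [List.map_nil, List.nil_append, List.foldl_nil]
      cases nxt with
      | nil => simp [bfsA, bfsB]
      | cons z zs =>
        rw [List.map_cons, bfsA, bfsB]
        simp only [fan]
        have hA := foldcorr grid m n z.1 z.2 (dist + 1) (zs.map (fan (dist + 1)))
          [((0 : Int), (1 : Int)), (1, 0), (-1, 0), (0, -1)] [] vis
        rw [List.map_nil, List.append_nil, dirs_map] at hA
        have hnode : nodeStepB grid m n (dist + 1) (.inl ([], vis)) z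
            = ([(z.1, z.2 + 1), (z.1 + 1, z.2), (z.1 - 1, z.2), (z.1, z.2 - 1)]).foldl
                (dirStepB grid m n (dist + 1)) (.inl ([], vis)) := rfl
        cases hB : ([(z.1, z.2 + 1), (z.1 + 1, z.2), (z.1 - 1, z.2), (z.1, z.2 - 1)]).foldl
            (dirStepB grid m n (dist + 1)) (.inl ([], vis)) with
        | inr k =>
          rw [hB, mapSt] at hA
          rw [hA, List.foldl_cons, hnode, hB, foldNodeB_inr]
        | inl st =>
          obtain ⟨nxt2, vis2⟩ := st
          rw [hB, mapSt] at hA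
          rw [hA, List.foldl_cons, hnode, hB]
          have hbd := foldBdir_bound grid m n (dist + 1) _ [] vis nxt2 vis2 hB
          have hmeas : 5 * unvis m n vis2 + zs.length + nxt2.length ≤ μ := by
            simp only [List.length_nil, List.length_cons] at hμ hbd
            omega
          have hI := ih zs nxt2 vis2 (dist + 1) hmeas
          cases hfold : List.foldl (nodeStepB grid m n (dist + 1)) (Sum.inl (nxt2, vis2)) zs with
          | inr k2 => rw [hfold] at hI; exact hI
          | inl st2 => obtain ⟨n3, v3⟩ := st2; rw [hfold] at hI; exact hI
    | cons w ws =>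
      rw [List.map_cons, List.cons_append, bfsA]
      simp only [fan]
      have hA := foldcorr grid m n w.1 w.2 dist (ws.map (fan dist))
        [((0 : Int), (1 : Int)), (1, 0), (-1, 0), (0, -1)] nxt vis
      rw [dirs_map] at hA
      have hnode : nodeStepB grid m n dist (.inl (nxt, vis)) w
          = ([(w.1, w.2 + 1), (w.1 + 1, w.2), (w.1 - 1, w.2), (w.1, w.2 - 1)]).foldl
              (dirStepB grid m n dist) (.inl (nxt, vis)) := rfl
      cases hB : ([(w.1, w.2 + 1), (w.1 + 1, w.2), (w.1 - 1, w.2), (w.1, w.2 - 1)]).foldl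
          (dirStepB grid m n dist) (.inl (nxt, vis)) with
      | inr k =>
        rw [hB, mapSt] at hA
        rw [hA, List.foldl_cons, hnode, hB, foldNodeB_inr]
      | inl st =>
        obtain ⟨nxt2, vis2⟩ := st
        rw [hB, mapSt] at hA
        rw [hA, List.foldl_cons, hnode, hB]
        have hbd := foldBdir_bound grid m n dist _ nxt vis nxt2 vis2 hB
        have hmeas : 5 * unvis m n vis2 + ws.length + nxt2.length ≤ μ := by
          simp only [List.length_cons] at hμ
          omega
        have hI := ih ws nxt2 vis2 dist hmeas
        cases hfold : List.foldl (nodeStepB grid m n dist) (Sum.inl (nxt2, vis2)) ws with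
        | inr k2 => rw [hfold] at hI; exact hI
        | inl st2 => obtain ⟨n3, v3⟩ := st2; rw [hfold] at hI; exact hI

lemma scan_eq (grid : List (List String)) (r : Int) :
    ∀ (hd : List String) (off : Int),
      (∀ (j : Nat), j < hd.length → gridAt grid r (off + (j : Int)) = hd.getD j "") →
      firstStarA grid r (PySem.List.pyRange off (off + hd.length) 1)
        = (PySem.List.index? hd "*").map (fun k => off + (k : Int)) := by
  intro hd
  induction hd with
  | nil =>
    intro off hg
    simp only [List.length_nil, Nat.cast_zero, add_zero]
    rw [PySem.List.pyRange_one_eq_nil (le_refl off)]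
    rw [(PySem.List.index?_eq_none_iff _ _).2 (by simp)]
    rfl
  | cons s ss ih =>
    intro off hg
    have h0 : gridAt grid r off = s := by
      have := hg 0 (by simp)
      simpa using this
    have hlen : ((s :: ss).length : Int) = (ss.length : Int) + 1 := by
      simp only [List.length_cons]; push_cast; ring
    have hlt : off < off + ((s :: ss).length : Int) := by rw [hlen]; omega
    rw [PySem.List.pyRange_one_cons hlt, firstStarA]
    by_cases hs : s = "*"
    · rw [h0, hs]
      rw [if_pos (by decide)]
      subst hs
      rw [PySem.List.index?_cons_self]
      simp
    · have hb : (gridAt grid r off == "*") = false := by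
        rw [h0]; exact beq_eq_false_iff_ne.2 hs
      rw [hb, if_neg (by simp)]
      have hbound : off + ((s :: ss).length : Int) = (off + 1) + (ss.length : Int) := by
        rw [hlen]; ring
      rw [hbound]
      rw [ih (off + 1) (fun j hj => by
        have := hg (j + 1) (by simpa using Nat.succ_lt_succ hj)
        rw [List.getD_cons_succ] at this
        rw [← this]
        congr 1
        push_cast
        ring)]
      rw [PySem.List.index?_cons_of_ne ss hs]
      cases PySem.List.index? ss "*" with
      | none => rfl
      | some k =>
        simp only [Option.map_some, Option.bind_eq_bind, Option.bind_some,
          Option.pure_def]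
        congr 1
        push_cast
        ring

lemma row_eq (grid : List (List String)) (r n : Int) (hn0 : 0 ≤ n)
    (hlen : n ≤ ((PySem.List.pyGetD grid r [] : List String)).length) :
    firstStarA grid r (PySem.List.pyRange 0 n 1)
      = (PySem.List.index?
            (PySem.List.slice (PySem.List.pyGetD grid r []) none (some n)) "*").map
          (fun k => (k : Int)) := by
  have hnat : n.toNat ≤ (PySem.List.pyGetD grid r [] : List String).length := by omega
  have hslice : PySem.List.slice (PySem.List.pyGetD grid r []) none (some n)
      = (PySem.List.pyGetD grid r []).take n.toNat :=
    PySem.List.slice_to _ hn0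
  have hlen2 : ((PySem.List.pyGetD grid r []).take n.toNat).length = n.toNat := by
    rw [List.length_take]; omega
  have hg : ∀ (j : Nat), j < ((PySem.List.pyGetD grid r []).take n.toNat).length →
      gridAt grid r ((0 : Int) + (j : Int))
        = ((PySem.List.pyGetD grid r []).take n.toNat).getD j "" := by
    intro j hj
    rw [hlen2] at hj
    rw [gridAt, zero_add, PySem.List.pyGetD_natCast]
    rw [List.getD_eq_getElem?_getD, List.getD_eq_getElem?_getD,
      List.getElem?_take_of_lt hj]
  have h := scan_eq grid r ((PySem.List.pyGetD grid r []).take n.toNat) 0 hg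
  rw [hlen2, zero_add, Int.toNat_of_nonneg hn0] at h
  rw [hslice]
  rw [h]
  simp

lemma seed_eq (grid : List (List String)) (m n : Int) (hn0 : 0 ≤ n)
    (hrows : ∀ r : Int, 0 ≤ r → r < m →
      n ≤ ((PySem.List.pyGetD grid r [] : List String)).length) :
    seedA grid m n = ((seedB grid m n).1.map (fan 0), (seedB grid m n).2) := by
  unfold seedA seedB
  have key : ∀ (rs : List Int), (∀ r ∈ rs, 0 ≤ r ∧ r < m) →
      ∀ (accF : List (Int × Int)) (accV : PySem.Set (Int × Int)),
      rs.foldl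
        (fun qv r =>
          match firstStarA grid r (PySem.List.pyRange 0 n 1) with
          | some c => (qv.1 ++ [(r, c, (0 : Int))], PySem.Set.add qv.2 (r, c))
          | none => qv)
        (accF.map (fan 0), accV)
      = ((rs.foldl
            (fun fv r =>
              let head := PySem.List.slice (PySem.List.pyGetD grid r []) none (some n)
              if head.contains "*" then
                let c : Int := ((PySem.List.index? head "*").getD 0 : Nat)
                (fv.1 ++ [(r, c)], PySem.Set.add fv.2 (r, c))
              else fv)
            (accF, accV)).1.map (fan 0),
         (rs.foldl
            (fun fv r =>
              let head := PySem.List.slice (PySem.List.pyGetD grid r []) none (some n)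
              if head.contains "*" then
                let c : Int := ((PySem.List.index? head "*").getD 0 : Nat)
                (fv.1 ++ [(r, c)], PySem.Set.add fv.2 (r, c))
              else fv)
            (accF, accV)).2) := by
    intro rs
    induction rs with
    | nil => intro _ accF accV; rfl
    | cons r rest ih =>
      intro hmem accF accV
      obtain ⟨hr0, hrm⟩ := hmem r (List.mem_cons_self)
      have hrow := row_eq grid r n hn0 (hrows r hr0 hrm)
      rw [List.foldl_cons, List.foldl_cons]
      dsimp only
      cases hidx : PySem.List.index?
          (PySem.List.slice (PySem.List.pyGetD grid r []) none (some n)) "*" with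
      | none =>
        have hcon : (PySem.List.slice (PySem.List.pyGetD grid r []) none (some n)).contains "*"
            = false := by
          rw [← Bool.not_eq_true, List.contains_iff_mem]
          exact (PySem.List.index?_eq_none_iff _ _).1 hidx
        rw [hidx] at hrow
        simp at hrow
        simp only [hrow, hcon, if_neg (by simp : ¬ (false = true))]
        exact ih (fun a ha => hmem a (List.mem_cons_of_mem r ha)) accF accV
      | some k =>
        have hcon : (PySem.List.slice (PySem.List.pyGetD grid r []) none (some n)).contains "*"
            = true := by
          rw [List.contains_iff_mem]
          have := (PySem.List.index?_isSome_iff _ _).1 (by rw [hidx]; rfl)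
          exact this
        rw [hidx] at hrow
        simp at hrow
        simp only [hrow, hcon, hidx, Option.getD_some, eq_self_iff_true, if_true]
        have hacc : (accF.map (fan 0)) ++ [(r, (k : Int), (0 : Int))]
            = ((accF ++ [(r, (k : Int))]).map (fan 0)) := by
          rw [List.map_append]; rfl
        rw [hacc]
        exact ih (fun a ha => hmem a (List.mem_cons_of_mem r ha)) (accF ++ [(r, (k : Int))])
          (PySem.Set.add accV (r, (k : Int)))
  exact key (PySem.List.pyRange 0 m 1)
    (fun r hr => by rw [PySem.List.mem_pyRange_one] at hr; exact hr) [] PySem.Set.empty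

-- A equals the layered restatement (the previous file's whole proof, as a lemma)
lemma A_eq_layer (grid : List (List String)) (hpre : Pre_getFood grid) :
    getFood grid = bfsB grid (grid.length : Int) ((grid.headD []).length : Int)
      (seedB grid (grid.length : Int) ((grid.headD []).length : Int)).1 0
      (seedB grid (grid.length : Int) ((grid.headD []).length : Int)).2 := by
  obtain ⟨hne, hrows⟩ := hpre
  show bfsA grid (grid.length : Int) ((grid.headD []).length : Int)
      (seedA grid (grid.length : Int) ((grid.headD []).length : Int)).1
      (seedA grid (grid.length : Int) ((grid.headD []).length : Int)).2
    = bfsB grid (grid.length : Int) ((grid.headD []).length : Int)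
      (seedB grid (grid.length : Int) ((grid.headD []).length : Int)).1 0
      (seedB grid (grid.length : Int) ((grid.headD []).length : Int)).2
  have hn0 : (0 : Int) ≤ ((grid.headD []).length : Int) := Int.natCast_nonneg _
  have hrows' : ∀ r : Int, 0 ≤ r → r < (grid.length : Int) →
      ((grid.headD []).length : Int) ≤ ((PySem.List.pyGetD grid r [] : List String)).length := by
    intro r h0 hm
    rw [PySem.List.pyGetD_of_nonneg _ _ h0]
    have hlt : r.toNat < grid.length := by omega
    rw [List.getD_eq_getElem?_getD, List.getElem?_eq_getElem hlt]
    exact_mod_cast hrows _ (List.getElem_mem hlt)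
  rw [seed_eq grid _ _ hn0 hrows']
  have hmid := mid grid (grid.length : Int) ((grid.headD []).length : Int)
    (5 * unvis (grid.length : Int) ((grid.headD []).length : Int)
        (seedB grid (grid.length : Int) ((grid.headD []).length : Int)).2
      + (seedB grid (grid.length : Int) ((grid.headD []).length : Int)).1.length)
    (seedB grid (grid.length : Int) ((grid.headD []).length : Int)).1 []
    (seedB grid (grid.length : Int) ((grid.headD []).length : Int)).2 0
    (by simp)
  rw [List.map_nil, List.append_nil] at hmid
  rw [hmid]
  cases hF : (seedB grid (grid.length : Int) ((grid.headD []).length : Int)).1 with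
  | nil => simp [bfsB]
  | cons f fs =>
    rw [bfsB]
    cases hfold : List.foldl
        (nodeStepB grid (grid.length : Int) ((grid.headD []).length : Int) 0)
        (Sum.inl ([], (seedB grid (grid.length : Int) ((grid.headD []).length : Int)).2))
        (f :: fs) with
    | inr k => rfl
    | inl st => obtain ⟨n3, v3⟩ := st; rfl

-- ---- bridging the layered loop to B's dilation sweep ----

lemma mem_cells (m n : Int) (q : Int × Int) :
    q ∈ cells m n ↔ (0 ≤ q.1 ∧ q.1 < m ∧ 0 ≤ q.2 ∧ q.2 < n) := by
  simp only [cells, List.mem_flatMap, List.mem_map]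
  constructor
  · rintro ⟨r, hr, c, hc, rfl⟩
    rw [PySem.List.mem_pyRange_one] at hr hc
    exact ⟨hr.1, hr.2, hc.1, hc.2⟩
  · rintro ⟨h1, h2, h3, h4⟩
    exact ⟨q.1, by rw [PySem.List.mem_pyRange_one]; omega,
           q.2, by rw [PySem.List.mem_pyRange_one]; omega, rfl⟩

lemma mem_nbrs_symm (z w : Int × Int) : z ∈ nbrs w ↔ w ∈ nbrs z := by
  simp only [nbrs, List.mem_cons, List.not_mem_nil, or_false, Prod.ext_iff]
  omega

lemma mem_growns (grid : List (List String)) (m n : Int) (cur : PySem.Set (Int × Int))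
    (z : Int × Int) :
    z ∈ growns grid m n cur ↔
      (0 ≤ z.1 ∧ z.1 < m ∧ 0 ≤ z.2 ∧ z.2 < n) ∧ gridAt grid z.1 z.2 = "O" ∧
        PySem.Set.contains cur z = false ∧
        ∃ w ∈ nbrs z, PySem.Set.contains cur w = true := by
  rw [growns, List.mem_filter, mem_cells]
  simp only [Bool.and_eq_true, Bool.not_eq_true', List.any_eq_true, beq_iff_eq]
  tauto

-- folding nodeStepB over the frontier = folding dirStepB over all its neighbours
lemma fold_node_flat (grid : List (List String)) (m n dist : Int) :
    ∀ (F : List (Int × Int)) (st : List (Int × Int) × PySem.Set (Int × Int)),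
      F.foldl (nodeStepB grid m n dist) (.inl st)
        = (F.flatMap nbrs).foldl (dirStepB grid m n dist) (.inl st) := by
  intro F
  induction F with
  | nil => intro st; rfl
  | cons w F' ih =>
    intro st
    rw [List.foldl_cons, List.flatMap_cons, List.foldl_append]
    have hnode : nodeStepB grid m n dist (.inl st) w
        = (nbrs w).foldl (dirStepB grid m n dist) (.inl st) := rfl
    rw [hnode]
    cases hB : (nbrs w).foldl (dirStepB grid m n dist) (.inl st) with
    | inr k => rw [foldNodeB_inr, foldBdir_inr]
    | inl st2 => exact ih st2

lemma dir_char_hash (grid : List (List String)) (m n dist : Int)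
    (acc : List (Int × Int)) (vis : PySem.Set (Int × Int)) (q : Int × Int)
    (hq : hashB grid m n q = true)
    (hH : ∀ z, PySem.Set.contains vis z = true → gridAt grid z.1 z.2 ≠ "#") :
    dirStepB grid m n dist (.inl (acc, vis)) q = .inr (dist + 1) := by
  rw [hashB, Bool.and_eq_true, decide_eq_true_eq, beq_iff_eq] at hq
  obtain ⟨hr, hhash⟩ := hq
  have hnc : PySem.Set.contains vis (q.1, q.2) = false := by
    rw [Bool.eq_false_iff]
    intro hc
    exact hH _ hc hhash
  rw [dirStepB]
  rw [if_pos ⟨hr.1, hr.2.1, hr.2.2.1, hr.2.2.2, hnc⟩]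
  simp only [hhash]
  rw [if_pos (by decide)]

lemma dir_char_no (grid : List (List String)) (m n dist : Int)
    (acc : List (Int × Int)) (vis : PySem.Set (Int × Int)) (q : Int × Int)
    (hq : hashB grid m n q = false)
    (hH : ∀ z, PySem.Set.contains vis z = true → gridAt grid z.1 z.2 ≠ "#") :
    ∃ acc' vis', dirStepB grid m n dist (.inl (acc, vis)) q = .inl (acc', vis')
      ∧ (∀ z, z ∈ acc' ↔ z ∈ acc ∨ (z = q ∧
          ((0 ≤ q.1 ∧ q.1 < m ∧ 0 ≤ q.2 ∧ q.2 < n) ∧ gridAt grid q.1 q.2 = "O" ∧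
            PySem.Set.contains vis q = false)))
      ∧ (∀ z, PySem.Set.contains vis' z = true ↔ PySem.Set.contains vis z = true ∨
          (z = q ∧ ((0 ≤ q.1 ∧ q.1 < m ∧ 0 ≤ q.2 ∧ q.2 < n) ∧ gridAt grid q.1 q.2 = "O" ∧
            PySem.Set.contains vis q = false)))
      ∧ (∀ z, PySem.Set.contains vis' z = true → gridAt grid z.1 z.2 ≠ "#") := by
  rw [dirStepB]
  by_cases hg : 0 ≤ q.1 ∧ q.1 < m ∧ 0 ≤ q.2 ∧ q.2 < n ∧
      PySem.Set.contains vis (q.1, q.2) = false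
  · rw [if_pos hg]
    have hnh : gridAt grid q.1 q.2 ≠ "#" := by
      intro hc
      rw [hashB, Bool.and_eq_false_iff] at hq
      rcases hq with h | h
      · rw [decide_eq_false_iff_not] at h
        exact h ⟨hg.1, hg.2.1, hg.2.2.1, hg.2.2.2.1⟩
      · rw [beq_eq_false_iff_ne] at h
        exact h hc
    have hgood : (0 ≤ q.1 ∧ q.1 < m ∧ 0 ≤ q.2 ∧ q.2 < n) ∧
        PySem.Set.contains vis q = false :=
      ⟨⟨hg.1, hg.2.1, hg.2.2.1, hg.2.2.2.1⟩, hg.2.2.2.2⟩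
    simp only [beq_eq_false_iff_ne.2 hnh, Bool.false_eq_true, if_false]
    by_cases hO : gridAt grid q.1 q.2 = "O"
    · simp only [hO]
      rw [if_pos (by decide)]
      refine ⟨acc ++ [(q.1, q.2)], PySem.Set.add vis (q.1, q.2), rfl, ?_, ?_, ?_⟩
      · intro z
        rw [List.mem_append, List.mem_singleton]
        constructor
        · rintro (h | h)
          · exact Or.inl h
          · refine Or.inr ⟨h, ?_⟩
            exact ⟨hgood.1, by simp [hO], hgood.2⟩
        · rintro (h | ⟨rfl, -⟩)
          · exact Or.inl h
          · exact Or.inr rfl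
      · intro z
        rw [contains_add_iff]
        constructor
        · rintro (h | h)
          · exact Or.inl h
          · refine Or.inr ⟨h, ?_⟩
            exact ⟨hgood.1, by simp [hO], hgood.2⟩
        · rintro (h | ⟨rfl, -⟩)
          · exact Or.inl h
          · exact Or.inr rfl
      · intro z hz
        rcases (contains_add_iff vis (q.1, q.2) z).1 hz with h | h
        · exact hH z h
        · rw [h]; rw [hO]; decide
    · simp only [beq_eq_false_iff_ne.2 hO, Bool.false_eq_true, if_false]
      refine ⟨acc, vis, rfl, ?_, ?_, hH⟩
      · intro z
        constructor
        · exact Or.inl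
        · rintro (h | ⟨rfl, -, hO', -⟩)
          · exact h
          · exact absurd hO' hO
      · intro z
        constructor
        · exact Or.inl
        · rintro (h | ⟨rfl, -, hO', -⟩)
          · exact h
          · exact absurd hO' hO
  · rw [if_neg hg]
    refine ⟨acc, vis, rfl, ?_, ?_, hH⟩
    · intro z
      constructor
      · exact Or.inl
      · rintro (h | ⟨rfl, hr, -, hnc⟩)
        · exact h
        · exact absurd ⟨hr.1, hr.2.1, hr.2.2.1, hr.2.2.2, hnc⟩ hg
    · intro z
      constructor
      · exact Or.inl
      · rintro (h | ⟨rfl, hr, -, hnc⟩)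
        · exact h
        · exact absurd ⟨hr.1, hr.2.1, hr.2.2.1, hr.2.2.2, hnc⟩ hg

lemma flat_inr (grid : List (List String)) (m n dist : Int) :
    ∀ (P : List (Int × Int)) (acc : List (Int × Int)) (vis : PySem.Set (Int × Int)),
      (∀ z, PySem.Set.contains vis z = true → gridAt grid z.1 z.2 ≠ "#") →
      (∃ q ∈ P, hashB grid m n q = true) →
      P.foldl (dirStepB grid m n dist) (.inl (acc, vis)) = .inr (dist + 1) := by
  intro P
  induction P with
  | nil =>
    intro acc vis hH hex
    obtain ⟨q, hq, -⟩ := hex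
    cases hq
  | cons q P' ih =>
    intro acc vis hH hex
    rw [List.foldl_cons]
    by_cases hq : hashB grid m n q = true
    · rw [dir_char_hash grid m n dist acc vis q hq hH, foldBdir_inr]
    · rw [Bool.not_eq_true] at hq
      obtain ⟨acc1, vis1, heq, -, -, hH1⟩ := dir_char_no grid m n dist acc vis q hq hH
      rw [heq]
      apply ih acc1 vis1 hH1
      obtain ⟨q2, hq2, hh2⟩ := hex
      rcases List.mem_cons.1 hq2 with rfl | h
      · rw [hh2] at hq; cases hq
      · exact ⟨q2, h, hh2⟩

lemma flat_ok (grid : List (List String)) (m n dist : Int) :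
    ∀ (P : List (Int × Int)) (V : Int × Int → Prop) (acc : List (Int × Int))
      (vis : PySem.Set (Int × Int)),
      (∀ z, PySem.Set.contains vis z = true ↔ V z ∨ z ∈ acc) →
      (∀ z, PySem.Set.contains vis z = true → gridAt grid z.1 z.2 ≠ "#") →
      (∀ q ∈ P, hashB grid m n q = false) →
      ∃ acc' vis', P.foldl (dirStepB grid m n dist) (.inl (acc, vis)) = .inl (acc', vis')
        ∧ (∀ z, z ∈ acc' ↔ z ∈ acc ∨ ((0 ≤ z.1 ∧ z.1 < m ∧ 0 ≤ z.2 ∧ z.2 < n) ∧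
            gridAt grid z.1 z.2 = "O" ∧ ¬ V z ∧ z ∈ P))
        ∧ (∀ z, PySem.Set.contains vis' z = true ↔ V z ∨ z ∈ acc')
        ∧ (∀ z, PySem.Set.contains vis' z = true → gridAt grid z.1 z.2 ≠ "#") := by
  intro P
  induction P with
  | nil =>
    intro V acc vis hs hH _
    exact ⟨acc, vis, rfl, fun z => by simp, hs, hH⟩
  | cons q P' ih =>
    intro V acc vis hs hH hno
    obtain ⟨acc1, vis1, heq, hacc1, hvis1, hH1⟩ :=
      dir_char_no grid m n dist acc vis q (hno q List.mem_cons_self) hH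
    rw [List.foldl_cons, heq]
    have hs1 : ∀ z, PySem.Set.contains vis1 z = true ↔ V z ∨ z ∈ acc1 := by
      intro z
      rw [hvis1, hacc1, hs]
      tauto
    obtain ⟨acc', vis', heq', hacc', hvis', hH'⟩ :=
      ih V acc1 vis1 hs1 hH1 (fun p hp => hno p (List.mem_cons_of_mem q hp))
    refine ⟨acc', vis', heq', ?_, hvis', hH'⟩
    intro z
    rw [hacc', hacc1]
    constructor
    · rintro ((h | ⟨rfl, hr, hO, hnc⟩) | ⟨hr, hO, hv, hP⟩)
      · exact Or.inl h
      · refine Or.inr ⟨hr, hO, ?_, List.mem_cons_self⟩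
        intro hV
        rw [Bool.eq_false_iff] at hnc
        exact hnc ((hs z).2 (Or.inl hV))
      · exact Or.inr ⟨hr, hO, hv, List.mem_cons_of_mem q hP⟩
    · rintro (h | ⟨hr, hO, hv, hP⟩)
      · exact Or.inl (Or.inl h)
      · rcases List.mem_cons.1 hP with rfl | h'
        · by_cases hza : z ∈ acc
          · exact Or.inl (Or.inl hza)
          · refine Or.inl (Or.inr ⟨rfl, hr, hO, ?_⟩)
            rw [Bool.eq_false_iff]
            intro hc
            rcases (hs z).1 hc with h | h
            · exact hv h
            · exact hza h
        · exact Or.inr ⟨hr, hO, hv, h'⟩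

-- unfolding helpers for the two loops
lemma bfsB_cons_inr (grid : List (List String)) (m n : Int) (f : Int × Int)
    (fs : List (Int × Int)) (dist : Int) (vis : PySem.Set (Int × Int)) (k : Int)
    (hfold : (f :: fs).foldl (nodeStepB grid m n dist) (.inl ([], vis)) = .inr k) :
    bfsB grid m n (f :: fs) dist vis = k := by
  rw [bfsB]
  split
  · next k2 heq =>
    rw [hfold] at heq
    cases heq
    rfl
  · next nxt vis' heq =>
    rw [hfold] at heq
    cases heq

lemma bfsB_cons_inl (grid : List (List String)) (m n : Int) (f : Int × Int)
    (fs : List (Int × Int)) (dist : Int) (vis : PySem.Set (Int × Int))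
    (nxt : List (Int × Int)) (vis' : PySem.Set (Int × Int))
    (hfold : (f :: fs).foldl (nodeStepB grid m n dist) (.inl ([], vis)) = .inl (nxt, vis')) :
    bfsB grid m n (f :: fs) dist vis = bfsB grid m n nxt (dist + 1) vis' := by
  rw [bfsB]
  split
  · next k2 heq =>
    rw [hfold] at heq
    cases heq
  · next nxt2 vis2 heq =>
    rw [hfold] at heq
    cases heq
    rfl

-- when the frontier is empty, the sweep also reports -1
lemma sweep_stuck (grid : List (List String)) (m n : Int)
    (vis S : PySem.Set (Int × Int)) (dist : Int)
    (hmem : ∀ z, PySem.Set.contains vis z = true ↔ PySem.Set.contains S z = true)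
    (hclo : ∀ z, (0 ≤ z.1 ∧ z.1 < m ∧ 0 ≤ z.2 ∧ z.2 < n) → gridAt grid z.1 z.2 = "O" →
      PySem.Set.contains vis z = false →
      (∃ w ∈ nbrs z, PySem.Set.contains vis w = true) →
        ∃ w ∈ nbrs z, w ∈ ([] : List (Int × Int)))
    (hfar : ∀ p, PySem.Set.contains vis p = true →
      (nbrs p).any (hashB grid m n) = false) :
    sweep grid m n S dist = -1 := by
  rw [sweep]
  have hany : S.any (fun p => (nbrs p).any (hashB grid m n)) = false := by
    rw [List.any_eq_false]; simp only [Bool.not_eq_true]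
    intro p hp
    exact hfar p ((hmem p).2 ((contains_eq_true_iff S p).2 hp))
  rw [hany]
  simp only [Bool.false_eq_true, if_false]
  have hgr : growns grid m n S = [] := by
    rw [List.eq_nil_iff_forall_not_mem]
    intro z hz
    rw [mem_growns] at hz
    obtain ⟨hr, hO, hnc, w, hw, hcw⟩ := hz
    have hncv : PySem.Set.contains vis z = false :=
      Bool.eq_false_iff.2 (fun h => Bool.eq_false_iff.1 hnc ((hmem z).1 h))
    obtain ⟨w2, -, hw2⟩ := hclo z hr hO hncv ⟨w, hw, (hmem w).2 hcw⟩
    exact List.not_mem_nil hw2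
  rw [dif_pos hgr]

-- the main bridge: the layered loop equals the whole-grid dilation sweep
lemma bridge (grid : List (List String)) (m n : Int) :
    ∀ (μ : Nat) (F : List (Int × Int)) (vis S : PySem.Set (Int × Int)) (dist : Int),
      5 * unvis m n vis + F.length ≤ μ →
      (∀ z, PySem.Set.contains vis z = true ↔ PySem.Set.contains S z = true) →
      (∀ z, PySem.Set.contains vis z = true → gridAt grid z.1 z.2 ≠ "#") →
      (∀ p ∈ F, PySem.Set.contains vis p = true) →
      (∀ z, (0 ≤ z.1 ∧ z.1 < m ∧ 0 ≤ z.2 ∧ z.2 < n) → gridAt grid z.1 z.2 = "O" →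
        PySem.Set.contains vis z = false →
        (∃ w ∈ nbrs z, PySem.Set.contains vis w = true) → ∃ w ∈ nbrs z, w ∈ F) →
      (∀ p, PySem.Set.contains vis p = true → p ∉ F →
        (nbrs p).any (hashB grid m n) = false) →
      bfsB grid m n F dist vis = sweep grid m n S dist := by
  intro μ
  induction μ with
  | zero =>
    intro F vis S dist hμ hmem hH hsub hclo hfar
    have hF : F = [] := List.eq_nil_of_length_eq_zero (by omega)
    subst hF
    rw [sweep_stuck grid m n vis S dist hmem hclo
      (fun p hp => hfar p hp (List.not_mem_nil))]
    simp [bfsB]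
  | succ μ ih =>
    intro F vis S dist hμ hmem hH hsub hclo hfar
    cases F with
    | nil =>
      rw [sweep_stuck grid m n vis S dist hmem hclo
        (fun p hp => hfar p hp (List.not_mem_nil))]
      simp [bfsB]
    | cons f fs =>
      by_cases hex : ∃ q ∈ (f :: fs).flatMap nbrs, hashB grid m n q = true
      · have hfold : (f :: fs).foldl (nodeStepB grid m n dist) (.inl ([], vis))
            = .inr (dist + 1) := by
          rw [fold_node_flat]
          exact flat_inr grid m n dist _ [] vis hH hex
        rw [bfsB_cons_inr grid m n f fs dist vis (dist + 1) hfold]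
        rw [sweep]
        have hany : S.any (fun p => (nbrs p).any (hashB grid m n)) = true := by
          obtain ⟨q, hqP, hq⟩ := hex
          rw [List.mem_flatMap] at hqP
          obtain ⟨w, hwF, hqn⟩ := hqP
          rw [List.any_eq_true]
          refine ⟨w, (contains_eq_true_iff S w).1 ((hmem w).1 (hsub w hwF)), ?_⟩
          rw [List.any_eq_true]
          exact ⟨q, hqn, hq⟩
        rw [hany, if_pos rfl]
      · have hno : ∀ q ∈ (f :: fs).flatMap nbrs, hashB grid m n q = false :=
          fun q hq => Bool.eq_false_iff.2 (fun h => hex ⟨q, hq, h⟩)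
        obtain ⟨acc', vis', heq', hacc', hvis', hH'⟩ :=
          flat_ok grid m n dist ((f :: fs).flatMap nbrs)
            (fun z => PySem.Set.contains vis z = true) [] vis
            (by intro z; simp) hH hno
        have hfold : (f :: fs).foldl (nodeStepB grid m n dist) (.inl ([], vis))
            = .inl (acc', vis') := by
          rw [fold_node_flat]
          exact heq'
        rw [bfsB_cons_inl grid m n f fs dist vis acc' vis' hfold]
        rw [sweep]
        have hany : S.any (fun p => (nbrs p).any (hashB grid m n)) = false := by
          rw [List.any_eq_false]; simp only [Bool.not_eq_true]
          intro p hpS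
          have hpv := (hmem p).2 ((contains_eq_true_iff S p).2 hpS)
          by_cases hpF : p ∈ f :: fs
          · rw [List.any_eq_false]; simp only [Bool.not_eq_true]
            intro q hqn
            exact Bool.eq_false_iff.2
              (fun h => hex ⟨q, List.mem_flatMap.2 ⟨p, hpF, hqn⟩, h⟩)
          · exact hfar p hpv hpF
        rw [hany]
        simp only [Bool.false_eq_true, if_false]
        have hmg : ∀ z, z ∈ growns grid m n S ↔ z ∈ acc' := by
          intro z
          rw [mem_growns, hacc']
          simp only [List.not_mem_nil, false_or]
          constructor
          · rintro ⟨hr, hO, hnc, w, hw, hcw⟩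
            have hncv : PySem.Set.contains vis z = false :=
              Bool.eq_false_iff.2 (fun h => Bool.eq_false_iff.1 hnc ((hmem z).1 h))
            obtain ⟨w2, hw2n, hw2F⟩ := hclo z hr hO hncv ⟨w, hw, (hmem w).2 hcw⟩
            exact ⟨hr, hO, Bool.eq_false_iff.1 hncv,
              List.mem_flatMap.2 ⟨w2, hw2F, (mem_nbrs_symm z w2).2 hw2n⟩⟩
          · rintro ⟨hr, hO, hnv, hzP⟩
            rw [List.mem_flatMap] at hzP
            obtain ⟨w, hwF, hzn⟩ := hzP
            refine ⟨hr, hO, Bool.eq_false_iff.2 (fun h => hnv ((hmem z).2 h)), ?_⟩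
            exact ⟨w, (mem_nbrs_symm w z).2 hzn, (hmem w).1 (hsub w hwF)⟩
        by_cases hgr : growns grid m n S = []
        · rw [dif_pos hgr]
          have hacc0 : acc' = [] := by
            rw [List.eq_nil_iff_forall_not_mem]
            intro z hz
            have := (hmg z).2 hz
            rw [hgr] at this
            exact List.not_mem_nil this
          rw [hacc0]
          simp [bfsB]
        · rw [dif_neg hgr]
          have hbd := foldBdir_bound grid m n dist ((f :: fs).flatMap nbrs) [] vis
            acc' vis' heq'
          apply ih
          · simp only [List.length_nil, List.length_cons] at hbd hμ ⊢
            omega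
          · intro z
            rw [hvis' z, contains_foldl_add]
            have h1 := hmem z
            have h2 := hmg z
            tauto
          · exact hH'
          · intro p hp
            exact (hvis' p).2 (Or.inr hp)
          · intro z hr hO hz' hadj
            obtain ⟨w, hwn, hcw⟩ := hadj
            rcases (hvis' w).1 hcw with hwV | hwA
            · have hzv : PySem.Set.contains vis z = false :=
                Bool.eq_false_iff.2
                  (fun h => Bool.eq_false_iff.1 hz' ((hvis' z).2 (Or.inl h)))
              obtain ⟨w2, hw2n, hw2F⟩ := hclo z hr hO hzv ⟨w, hwn, hwV⟩
              have hzA : z ∈ acc' := (hacc' z).2 (Or.inr ⟨hr, hO,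
                Bool.eq_false_iff.1 hzv,
                List.mem_flatMap.2 ⟨w2, hw2F, (mem_nbrs_symm z w2).2 hw2n⟩⟩)
              exact absurd ((hvis' z).2 (Or.inr hzA)) (Bool.eq_false_iff.1 hz')
            · exact ⟨w, hwn, hwA⟩
          · intro p hp hpnot
            rcases (hvis' p).1 hp with hpV | hpA
            · by_cases hpF : p ∈ f :: fs
              · rw [List.any_eq_false]; simp only [Bool.not_eq_true]
                intro q hqn
                exact Bool.eq_false_iff.2
                  (fun h => hex ⟨q, List.mem_flatMap.2 ⟨p, hpF, hqn⟩, h⟩)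
              · exact hfar p hpV hpF
            · exact absurd hpA hpnot

lemma seedC_eq (grid : List (List String)) (m n : Int) :
    seedC grid m n = (seedB grid m n).2 := by
  unfold seedC seedB
  have key : ∀ (rs : List Int) (accF : List (Int × Int)) (accV : PySem.Set (Int × Int)),
      rs.foldl
        (fun cur r =>
          let head := PySem.List.slice (PySem.List.pyGetD grid r []) none (some n)
          if head.contains "*" then
            PySem.Set.add cur (r, (((PySem.List.index? head "*").getD 0 : Nat) : Int))
          else cur)
        accV
      = (rs.foldl
          (fun fv r =>
            let head := PySem.List.slice (PySem.List.pyGetD grid r []) none (some n)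
            if head.contains "*" then
              let c : Int := ((PySem.List.index? head "*").getD 0 : Nat)
              (fv.1 ++ [(r, c)], PySem.Set.add fv.2 (r, c))
            else fv)
          (accF, accV)).2 := by
    intro rs
    induction rs with
    | nil => intro accF accV; rfl
    | cons r rest ih =>
      intro accF accV
      rw [List.foldl_cons, List.foldl_cons]
      dsimp only
      by_cases hcon : (PySem.List.slice (PySem.List.pyGetD grid r []) none (some n)).contains "*"
      · simp only [hcon, if_true]
        exact ih _ _
      · simp only [hcon, Bool.false_eq_true, if_false]
        exact ih _ _
  exact key _ [] PySem.Set.empty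

lemma seedF_mem (grid : List (List String)) (m n : Int) (z : Int × Int) :
    z ∈ (seedB grid m n).1 ↔ z ∈ (seedB grid m n).2 := by
  unfold seedB
  have key : ∀ (rs : List Int) (accF : List (Int × Int)) (accV : PySem.Set (Int × Int)),
      (∀ q : Int × Int, q ∈ accF ↔ q ∈ accV) →
      ∀ q : Int × Int,
        (q ∈ (rs.foldl
          (fun fv r =>
            let head := PySem.List.slice (PySem.List.pyGetD grid r []) none (some n)
            if head.contains "*" then
              let c : Int := ((PySem.List.index? head "*").getD 0 : Nat)
              (fv.1 ++ [(r, c)], PySem.Set.add fv.2 (r, c))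
            else fv)
          (accF, accV)).1
        ↔ q ∈ (rs.foldl
          (fun fv r =>
            let head := PySem.List.slice (PySem.List.pyGetD grid r []) none (some n)
            if head.contains "*" then
              let c : Int := ((PySem.List.index? head "*").getD 0 : Nat)
              (fv.1 ++ [(r, c)], PySem.Set.add fv.2 (r, c))
            else fv)
          (accF, accV)).2) := by
    intro rs
    induction rs with
    | nil => intro accF accV hinv q; exact hinv q
    | cons r rest ih =>
      intro accF accV hinv q
      rw [List.foldl_cons]
      dsimp only
      by_cases hcon : (PySem.List.slice (PySem.List.pyGetD grid r []) none (some n)).contains "*"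
      · simp only [hcon, if_true]
        refine ih _ _ (fun p => ?_) q
        rw [List.mem_append, List.mem_singleton, PySem.Set.mem_add, hinv p]
      · simp only [hcon, Bool.false_eq_true, if_false]
        exact ih _ _ hinv q
  exact key _ [] PySem.Set.empty (fun q => by simp [PySem.Set.empty]) z

lemma seeds_star (grid : List (List String)) (m n : Int) (hn0 : 0 ≤ n) :
    ∀ q ∈ (seedB grid m n).2, gridAt grid q.1 q.2 = "*" := by
  unfold seedB
  have key : ∀ (rs : List Int) (accF : List (Int × Int)) (accV : PySem.Set (Int × Int)),
      (∀ q : Int × Int, q ∈ accV → gridAt grid q.1 q.2 = "*") →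
      ∀ q : Int × Int, q ∈ (rs.foldl
          (fun fv r =>
            let head := PySem.List.slice (PySem.List.pyGetD grid r []) none (some n)
            if head.contains "*" then
              let c : Int := ((PySem.List.index? head "*").getD 0 : Nat)
              (fv.1 ++ [(r, c)], PySem.Set.add fv.2 (r, c))
            else fv)
          (accF, accV)).2 → gridAt grid q.1 q.2 = "*" := by
    intro rs
    induction rs with
    | nil => intro accF accV hinv q hq; exact hinv q hq
    | cons r rest ih =>
      intro accF accV hinv q hq
      rw [List.foldl_cons] at hq
      dsimp only at hq
      by_cases hcon : (PySem.List.slice (PySem.List.pyGetD grid r []) none (some n)).contains "*"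
      · simp only [hcon, if_true] at hq
        refine ih _ _ (fun p hp => ?_) q hq
        rcases (PySem.Set.mem_add _ _ _).1 hp with h | h
        · exact hinv p h
        · subst h
          have hmem : "*" ∈ PySem.List.slice (PySem.List.pyGetD grid r []) none (some n) := by
            rw [← List.contains_iff_mem]
            exact hcon
          have hsome := (PySem.List.index?_isSome_iff
            (PySem.List.slice (PySem.List.pyGetD grid r []) none (some n)) "*").2 hmem
          obtain ⟨k, hk⟩ := Option.isSome_iff_exists.1 hsome
          obtain ⟨hklt, hkel, -⟩ := PySem.List.getElem_of_index?_eq_some hk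
          have hsl : PySem.List.slice (PySem.List.pyGetD grid r []) none (some n)
              = (PySem.List.pyGetD grid r []).take n.toNat :=
            PySem.List.slice_to _ hn0
          rw [hk]
          show gridAt grid r ((k : Nat) : Int) = "*"
          rw [gridAt, PySem.List.pyGetD_natCast]
          have h1 : (PySem.List.slice (PySem.List.pyGetD grid r []) none (some n))[k]?
              = some "*" := by
            rw [List.getElem?_eq_getElem hklt, hkel]
          rw [hsl] at h1
          have hkn : k < n.toNat := by
            have := hklt
            rw [hsl, List.length_take] at this
            omega
          rw [List.getElem?_take_of_lt hkn] at h1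
          rw [List.getD_eq_getElem?_getD, h1]
          rfl
      · simp only [hcon, Bool.false_eq_true, if_false] at hq
        exact ih _ _ hinv q hq
  exact key _ [] PySem.Set.empty (fun q hq => absurd hq (List.not_mem_nil)) 

-- ===== VERDICT (by name: the statement is the Claim_ definition above) =====
theorem getFood_spec : Claim_equal_getFood := by
  intro grid _ hpre
  show getFood grid = getFood_alt grid
  rw [A_eq_layer grid hpre]
  show bfsB grid (grid.length : Int) ((grid.headD []).length : Int)
      (seedB grid (grid.length : Int) ((grid.headD []).length : Int)).1 0
      (seedB grid (grid.length : Int) ((grid.headD []).length : Int)).2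
    = sweep grid (grid.length : Int) ((grid.headD []).length : Int)
      (seedC grid (grid.length : Int) ((grid.headD []).length : Int)) 0
  rw [seedC_eq]
  apply bridge grid (grid.length : Int) ((grid.headD []).length : Int)
    (5 * unvis (grid.length : Int) ((grid.headD []).length : Int)
        (seedB grid (grid.length : Int) ((grid.headD []).length : Int)).2
      + (seedB grid (grid.length : Int) ((grid.headD []).length : Int)).1.length)
    _ _ _ 0 (le_refl _)
  · intro z; exact Iff.rfl
  · intro z hz
    have hst := seeds_star grid _ _ (Int.natCast_nonneg _) z
      ((contains_eq_true_iff _ _).1 hz)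
    rw [hst]
    decide
  · intro p hp
    exact (contains_eq_true_iff _ _).2 ((seedF_mem grid _ _ p).1 hp)
  · intro z _ _ _ hadj
    obtain ⟨w, hwn, hcw⟩ := hadj
    exact ⟨w, hwn, (seedF_mem grid _ _ w).2 ((contains_eq_true_iff _ _).1 hcw)⟩
  · intro p hp hpF
    exact absurd ((seedF_mem grid _ _ p).2 ((contains_eq_true_iff _ _).1 hp)) hpF
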